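-- pv_equiv track=rewrite | github.com/Jane11111/Leetcode2021 | MeiTuan02.py | solve
-- ===== SOURCE A (Python) =====
-- def solve(s):
--     s = s.replace(' ','')
--
--     i = 0
--     ans = ''
--     while i<len(s):
--         ans+=s[i]
--         i+=1
--         while i<len(s) and s[i] == s[i-1]:
--             i+=1
--     return ans
-- ===== SOURCE B (Python) =====
-- def solve(s):
--     out = []
--     for c in reversed(s):
--         if c != ' ' and (not out or out[-1] != c):
--             out.append(c)
--     return ''.join(reversed(out))
-- ===== Notes on version B (the rewrite author's own statement) =====
-- stated objective: faster
-- what changed: Instead of A's staged replace pre-pass plus a forward index walk with a nested run-skipping while loop and quadratic ans+= string concatenation, B makes one backward pass over the original string, skips spaces inline, keeps the last character of each run by comparing against the last element appended to a list, and joins the reversed list at the end.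
import Mathlib
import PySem

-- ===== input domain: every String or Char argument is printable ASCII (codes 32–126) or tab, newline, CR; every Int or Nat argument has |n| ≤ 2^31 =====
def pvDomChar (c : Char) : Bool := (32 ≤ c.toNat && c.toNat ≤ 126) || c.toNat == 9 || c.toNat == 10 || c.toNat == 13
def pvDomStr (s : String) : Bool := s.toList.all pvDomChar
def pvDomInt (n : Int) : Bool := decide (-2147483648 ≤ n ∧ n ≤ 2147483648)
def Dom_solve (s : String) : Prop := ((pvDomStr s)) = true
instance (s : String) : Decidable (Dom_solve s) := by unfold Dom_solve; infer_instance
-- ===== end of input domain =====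

-- B replaces A's replace pre-pass + forward walk with nested run-skipping by one backward pass
-- (inline space skip, keep last char of each run, reverse at the end); return values proved equal.

-- ===== PORT A =====
-- inner 'while i<len(s) and s[i]==s[i-1]: i+=1' (only ever entered with 1 ≤ i)
def solveSkip (cs : List Char) (i : Nat) : Nat :=
  if _h : i < cs.length ∧ cs.getD i ' ' = cs.getD (i - 1) ' ' then
    solveSkip cs (i + 1)
  else i
termination_by cs.length - i
decreasing_by omega

theorem solveSkip_ge (cs : List Char) (i : Nat) : i ≤ solveSkip cs i := by
  fun_induction solveSkip cs i with
  | case1 i _h ih => omega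
  | case2 i _h => omega

-- outer 'while i<len(s): ans+=s[i]; i+=1; <inner>'
def solveLoop (cs : List Char) (i : Nat) (ans : List Char) : List Char :=
  if _h : i < cs.length then
    solveLoop cs (solveSkip cs (i + 1)) (ans ++ [cs.getD i ' '])
  else ans
termination_by cs.length - i
decreasing_by have := solveSkip_ge cs (i + 1); omega

def solve (s : String) : String :=
  String.ofList (solveLoop (PySem.Str.replace s " " "").toList 0 [])

-- ===== PORT B =====
-- loop body: 'if c != ' ' and (not out or out[-1] != c): out.append(c)'
def altStep (out : List Char) (c : Char) : List Char :=
  if c ≠ ' ' ∧ (out = [] ∨ out.getLast? ≠ some c) then out ++ [c] else out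

-- 'for c in reversed(s): …' then ''.join(reversed(out))
def solve_alt (s : String) : String :=
  String.ofList ((s.toList.reverse.foldl altStep []).reverse)

-- ===== PRECONDITION & SPEC =====
def Spec_solve (s : String) (out : String) : Prop := out = solve_alt s
instance (s : String) (out : String) : Decidable (Spec_solve s out) := by unfold Spec_solve; infer_instance

-- ===== CLAIM (what is proved, stated in full; the proofs are below) =====
def Claim_equal_solve : Prop := ∀ (s : String), Dom_solve s → Spec_solve s (solve s)

-- ===== LEMMAS AND PROOFS =====

-- one representative char per maximal run (proof-side characterisation both ports meet)
def groupKeys (cs : List Char) : List Char :=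
  match cs with
  | [] => []
  | [a] => [a]
  | a :: b :: t => if a = b then groupKeys (b :: t) else a :: groupKeys (b :: t)

theorem groupKeys_cons (a : Char) (t : List Char) :
    groupKeys (a :: t) = a :: groupKeys (t.dropWhile (· = a)) := by
  induction t generalizing a with
  | nil => simp [groupKeys]
  | cons b t ih =>
    by_cases hab : a = b
    · subst hab
      simp only [groupKeys, List.dropWhile]
      rw [ih a]
      simp
    · simp only [groupKeys, if_neg hab, List.dropWhile]
      simp [Ne.symm hab]

-- ----- A-side: solveLoop computes groupKeys of the remaining suffix -----
theorem solveSkip_drop (cs : List Char) (i : Nat) (c : Char) (hi : 1 ≤ i)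
    (hc : cs.getD (i - 1) ' ' = c) :
    cs.drop (solveSkip cs i) = (cs.drop i).dropWhile (· = c) := by
  fun_induction solveSkip cs i with
  | case1 i h ih =>
    obtain ⟨hlt, heq⟩ := h
    have hdrop : cs.drop i = cs.getD i ' ' :: cs.drop (i + 1) :=
      List.drop_eq_getElem_cons hlt ▸ by simp [List.getD, hlt]
    rw [hdrop]
    have hci : cs.getD i ' ' = c := by rw [heq, hc]
    rw [List.dropWhile_cons_of_pos (by simpa using hci)]
    exact ih (by omega) (by simpa [List.getD] using hci)
  | case2 i h =>
    rcases Nat.lt_or_ge i cs.length with hlt | hge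
    · have hne : cs.getD i ' ' ≠ cs.getD (i - 1) ' ' := by
        intro he; exact h ⟨hlt, he⟩
      have hdrop : cs.drop i = cs.getD i ' ' :: cs.drop (i + 1) :=
        List.drop_eq_getElem_cons hlt ▸ by simp [List.getD, hlt]
      rw [hdrop, List.dropWhile_cons_of_neg (by simp [List.getD] at hne ⊢; rw [← hc] at *; simpa [List.getD] using hne)]
    · simp [List.drop_eq_nil_of_le hge]

theorem solveLoop_eq (cs : List Char) (i : Nat) (ans : List Char) :
    solveLoop cs i ans = ans ++ groupKeys (cs.drop i) := by
  fun_induction solveLoop cs i ans with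
  | case1 i ans h ih =>
    have hdrop : cs.drop i = cs.getD i ' ' :: cs.drop (i + 1) :=
      List.drop_eq_getElem_cons h ▸ by simp [List.getD, h]
    rw [ih, hdrop, groupKeys_cons,
      solveSkip_drop cs (i + 1) (cs.getD i ' ') (by omega) (by simp)]
    simp
  | case2 i ans h =>
    have hge : cs.length ≤ i := by omega
    rw [List.drop_eq_nil_of_le hge]
    simp [groupKeys]

-- s.replace(' ','') removes exactly the spaces
theorem replace_go_filter (fuel : Nat) (cs acc : List Char) (hf : cs.length ≤ fuel) :
    PySem.Chars.replace.go [' '] [] fuel cs acc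
      = acc.reverse ++ cs.filter (· ≠ ' ') := by
  induction fuel generalizing cs acc with
  | zero =>
    have : cs = [] := List.eq_nil_of_length_eq_zero (by omega)
    subst this; rfl
  | succ fuel ih =>
    cases cs with
    | nil => simp [PySem.Chars.replace.go]
    | cons c t =>
      simp only [PySem.Chars.replace.go]
      by_cases hc : c = ' '
      · subst hc
        rw [if_pos (by simp [List.isPrefixOf])]
        simp only [List.length_cons] at hf
        rw [ih _ _ (by simpa using hf)]
        simp
      · rw [if_neg (by simp [List.isPrefixOf, Ne.symm hc])]
        simp only [List.length_cons] at hf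
        rw [ih _ _ (by omega)]
        simp [hc]

theorem replace_filter (cs : List Char) :
    PySem.Chars.replace cs [' '] [] = cs.filter (· ≠ ' ') := by
  cases cs with
  | nil => rfl
  | cons c t =>
    simp only [PySem.Chars.replace]
    exact replace_go_filter _ _ _ (by simp)

-- ----- B-side: the backward fold builds (groupKeys of the filtered list).reverse -----
theorem foldr_altStep (cs : List Char) :
    cs.foldr (fun c out => altStep out c) []
      = (groupKeys (cs.filter (· ≠ ' '))).reverse := by
  induction cs with
  | nil => simp [groupKeys]
  | cons c t ih =>
    simp only [List.foldr_cons, ih]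
    by_cases hc : c = ' '
    · subst hc
      simp [altStep]
    · rw [List.filter_cons_of_pos (by simpa using hc)]
      cases hft : t.filter (· ≠ ' ') with
      | nil => simp [altStep, hc, groupKeys]
      | cons b u =>
        have hkey : groupKeys (b :: u) = b :: groupKeys (u.dropWhile (· = b)) :=
          groupKeys_cons b u
        by_cases hcb : c = b
        · subst hcb
          have hstep : altStep ((groupKeys (c :: u)).reverse) c
              = (groupKeys (c :: u)).reverse := by
            unfold altStep
            rw [if_neg (by simp [hkey])]
          rw [hstep]
          have hgk : groupKeys (c :: c :: u) = groupKeys (c :: u) := by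
            simp [groupKeys]
          rw [hgk]
        · rw [altStep, if_pos ⟨by simpa using hc,
            Or.inr (by rw [hkey]; simp; exact fun h => hcb h.symm)⟩]
          have hgk : groupKeys (c :: b :: u) = c :: groupKeys (b :: u) := by
            simp [groupKeys, hcb]
          rw [hgk]
          simp

-- ===== VERDICT (by name: the statement is the Claim_ definition above) =====
theorem solve_spec : Claim_equal_solve := by
  intro s _
  unfold Spec_solve solve solve_alt
  rw [solveLoop_eq, List.foldl_reverse, foldr_altStep, List.reverse_reverse]
  have hA : (PySem.Str.replace s " " "").toList = s.toList.filter (· ≠ ' ') := by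
    have h1 : (PySem.Str.replace s " " "").toList
        = PySem.Chars.replace s.toList [' '] [] := by
      simp [show (" " : String).toList = [' '] from rfl,
        show ("" : String).toList = ([] : List Char) from rfl]
    rw [h1, replace_filter]
  simp [hA]
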